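-- pv_equiv track=rewrite | github.com/arpanz/policylens | rag_engine/chunking/clause_chunker.py | _resolve_page
-- ===== SOURCE A (Python) =====
-- def _resolve_page(
--     full_text: str,
--     section_text: str,
--     page_map: dict | None,
--     fallback: int,
-- ) -> int:
--     # Use real page_map if available (ingestion path), fall back to estimate for dry-run/test mode
--     if not page_map:
--         return fallback + max(1, len(section_text) // 3000)
--
--     offset = full_text.find(section_text[:80])
--     if offset == -1:
--         return fallback
--
--     candidates = [k for k in page_map if k <= offset]
--     if not candidates:
--         return fallback
--
--     return page_map[max(candidates)]
-- ===== SOURCE B (Python) =====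
-- def _resolve_page(
--     full_text: str,
--     section_text: str,
--     page_map: dict | None,
--     fallback: int,
-- ) -> int:
--     # Sort the keys once, then binary-search (bisect_right, hand-rolled since the
--     # module imports nothing) for the rightmost key <= offset.
--     if not page_map:
--         return fallback + max(1, len(section_text) // 3000)
--
--     offset = full_text.find(section_text[:80])
--     if offset == -1:
--         return fallback
--
--     keys = sorted(page_map)
--     lo, hi = 0, len(keys)
--     while lo < hi:
--         mid = (lo + hi) // 2
--         if keys[mid] <= offset:
--             lo = mid + 1
--         else:
--             hi = mid
--     if lo == 0:
--         return fallback
--     return page_map[keys[lo - 1]]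
-- ===== Notes on version B (the rewrite author's own statement) =====
-- stated objective: alternative
-- what changed: Replaces A's filter-all-keys-then-max-then-dict-lookup with sort-then-binary-search: the keys are sorted once and a hand-rolled bisect_right locates the rightmost key <= offset, indexing directly into the sorted list.
import Mathlib
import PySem

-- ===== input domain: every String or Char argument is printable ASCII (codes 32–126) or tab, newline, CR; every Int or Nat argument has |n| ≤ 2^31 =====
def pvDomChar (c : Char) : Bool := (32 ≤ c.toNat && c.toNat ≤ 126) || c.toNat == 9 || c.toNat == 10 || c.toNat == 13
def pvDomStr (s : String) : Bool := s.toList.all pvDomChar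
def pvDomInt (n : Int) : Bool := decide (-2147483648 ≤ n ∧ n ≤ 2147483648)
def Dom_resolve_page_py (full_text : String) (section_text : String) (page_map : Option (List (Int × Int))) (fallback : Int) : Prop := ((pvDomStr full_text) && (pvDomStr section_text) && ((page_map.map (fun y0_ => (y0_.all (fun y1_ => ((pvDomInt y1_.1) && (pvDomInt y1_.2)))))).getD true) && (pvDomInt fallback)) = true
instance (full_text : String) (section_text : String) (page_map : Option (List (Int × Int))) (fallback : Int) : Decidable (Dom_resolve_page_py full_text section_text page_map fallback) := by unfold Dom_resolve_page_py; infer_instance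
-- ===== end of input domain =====

-- B replaces A's filter-then-max-then-lookup by sorting the keys once and binary-searching
-- (hand-rolled bisect_right) for the rightmost key ≤ offset (objective: alternative).

-- ===== PORT A =====
def resolve_page_py (full_text : String) (section_text : String) (page_map : Option (List (Int × Int))) (fallback : Int) : Int :=
  let pairs := page_map.getD []
  if pairs.isEmpty then
    fallback + max 1 (PySem.Int.floordiv (PySem.Str.len section_text) 3000)
  else
    let d := PySem.Dict.ofList pairs
    let offset := PySem.Str.find full_text (PySem.Str.slice section_text none (some 80))
    if offset = -1 then fallback
    else
      let candidates := d.keys.filter (fun k => decide (k ≤ offset))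
      match PySem.List.max? candidates (fun x => x) with
      | none => fallback
      | some m => d.getD m 0   -- page_map[max(candidates)]: key present, so getD is exact

-- ===== PORT B =====
-- B-side helper: Source B's while-loop (lo, hi are list indices, hence Nat; keys[mid] is
-- always in range, so List.getD is exact there; (lo+hi)//2 on Nats is Nat division)
def pvBisect (ks : List Int) (off : Int) (lo hi : Nat) : Nat :=
  if lo < hi then
    let mid := (lo + hi) / 2
    if ks.getD mid 0 ≤ off then pvBisect ks off (mid + 1) hi
    else pvBisect ks off lo mid
  else lo
termination_by hi - lo
decreasing_by all_goals omega

def resolve_page_py_alt (full_text : String) (section_text : String) (page_map : Option (List (Int × Int))) (fallback : Int) : Int :=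
  let pairs := page_map.getD []
  if pairs.isEmpty then
    fallback + max 1 (PySem.Int.floordiv (PySem.Str.len section_text) 3000)
  else
    let d := PySem.Dict.ofList pairs
    let offset := PySem.Str.find full_text (PySem.Str.slice section_text none (some 80))
    if offset = -1 then fallback
    else
      let keys := PySem.List.sorted d.keys (fun x => x) false
      let lo := pvBisect keys offset 0 keys.length
      if lo = 0 then fallback
      else d.getD (keys.getD (lo - 1) 0) 0   -- page_map[keys[lo-1]]: key present, getD exact

-- ===== PRECONDITION & SPEC =====
def Spec_resolve_page_py (full_text : String) (section_text : String) (page_map : Option (List (Int × Int))) (fallback : Int) (out : Int) : Prop := out = resolve_page_py_alt full_text section_text page_map fallback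
instance (full_text : String) (section_text : String) (page_map : Option (List (Int × Int))) (fallback : Int) (out : Int) : Decidable (Spec_resolve_page_py full_text section_text page_map fallback out) := by unfold Spec_resolve_page_py; infer_instance

-- ===== CLAIM (what is proved, stated in full; the proofs are below) =====
def Claim_equal_resolve_page_py : Prop := ∀ (full_text : String) (section_text : String) (page_map : Option (List (Int × Int))) (fallback : Int), Dom_resolve_page_py full_text section_text page_map fallback → Spec_resolve_page_py full_text section_text page_map fallback (resolve_page_py full_text section_text page_map fallback)

-- ===== LEMMAS AND PROOFS =====

theorem pvBisect_stop (ks : List Int) (off : Int) (lo hi : Nat) (h : ¬ lo < hi) :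
    pvBisect ks off lo hi = lo := by
  rw [pvBisect]; simp [h]

theorem pvBisect_step (ks : List Int) (off : Int) (lo hi : Nat) (h : lo < hi) :
    pvBisect ks off lo hi =
      if ks.getD ((lo + hi) / 2) 0 ≤ off then pvBisect ks off ((lo + hi) / 2 + 1) hi
      else pvBisect ks off lo ((lo + hi) / 2) := by
  rw [pvBisect]; simp [h]

-- bisect_right on a (weakly) sorted list: everything left of the result is ≤ off,
-- everything from the result on is > off.
theorem pvBisect_spec (ks : List Int) (off : Int)
    (hs : ∀ (i j : Nat) (hij : i ≤ j) (hj : j < ks.length), ks[i]'(by omega) ≤ ks[j]) :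
    ∀ (n lo hi : Nat), hi - lo ≤ n → lo ≤ hi → hi ≤ ks.length →
    (∀ i, (hi' : i < ks.length) → i < lo → ks[i] ≤ off) →
    (∀ i, (hi' : i < ks.length) → hi ≤ i → ¬ ks[i] ≤ off) →
    lo ≤ pvBisect ks off lo hi ∧ pvBisect ks off lo hi ≤ hi ∧
    (∀ i, (hi' : i < ks.length) → i < pvBisect ks off lo hi → ks[i] ≤ off) ∧
    (∀ i, (hi' : i < ks.length) → pvBisect ks off lo hi ≤ i → ¬ ks[i] ≤ off) := by
  intro n
  induction n with
  | zero =>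
    intro lo hi hfuel hle hhi hL hR
    rw [pvBisect_stop ks off lo hi (by omega)]
    exact ⟨le_refl _, hle, hL, fun i hi' hge => hR i hi' (by omega)⟩
  | succ n ih =>
    intro lo hi hfuel hle hhi hL hR
    by_cases hlt : lo < hi
    · rw [pvBisect_step ks off lo hi hlt]
      have hmb : lo ≤ (lo + hi) / 2 ∧ (lo + hi) / 2 < hi := by omega
      have hmlt : (lo + hi) / 2 < ks.length := by omega
      rw [List.getD_eq_getElem ks 0 hmlt]
      by_cases hm : ks[(lo + hi) / 2] ≤ off
      · rw [if_pos hm]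
        have h := ih ((lo + hi) / 2 + 1) hi (by omega) (by omega) hhi
          (fun i hi' hilt => le_trans (hs i ((lo + hi) / 2) (by omega) hmlt) hm) hR
        exact ⟨by omega, h.2.1, h.2.2.1, h.2.2.2⟩
      · rw [if_neg hm]
        have h := ih lo ((lo + hi) / 2) (by omega) (by omega) (by omega) hL
          (fun i hi' hige => fun hc => hm (le_trans (hs ((lo + hi) / 2) i hige hi') hc))
        exact ⟨h.1, by omega, h.2.2.1, h.2.2.2⟩
    · rw [pvBisect_stop ks off lo hi hlt]
      exact ⟨le_refl _, hle, hL, fun i hi' hge => hR i hi' (by omega)⟩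

-- The heart of the claim: A's filter + max + lookup over the dict's keys equals B's
-- sort + bisect + index, for any dict with unique keys.
theorem pvCore (fb off : Int) (d : PySem.Dict Int Int) :
    (match PySem.List.max? (d.keys.filter (fun k => decide (k ≤ off))) (fun x => x) with
     | none => fb
     | some m => d.getD m 0)
    = (if pvBisect (PySem.List.sorted d.keys (fun x => x) false) off 0
          (PySem.List.sorted d.keys (fun x => x) false).length = 0 then fb
       else d.getD ((PySem.List.sorted d.keys (fun x => x) false).getD
          (pvBisect (PySem.List.sorted d.keys (fun x => x) false) off 0
            (PySem.List.sorted d.keys (fun x => x) false).length - 1) 0) 0) := by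
  set ks := PySem.List.sorted d.keys (fun x => x) false with hks
  have hperm : ks.Perm d.keys := PySem.List.sorted_perm d.keys (fun x => x) false
  have hmem : ∀ x, x ∈ ks ↔ x ∈ d.keys := fun x => hperm.mem_iff
  have hmono : ∀ (i j : Nat) (hij : i ≤ j) (hj : j < ks.length), ks[i]'(by omega) ≤ ks[j] :=
    fun i j hij hj => PySem.List.sorted_id_getElem_mono d.keys hij hj
  obtain ⟨-, hrle, hA, hB⟩ :=
    pvBisect_spec ks off hmono ks.length 0 ks.length (by omega) (by omega) (le_refl _)
      (by omega) (by intro i h1 h2; omega)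
  set r := pvBisect ks off 0 ks.length with hr
  by_cases h0 : r = 0
  · -- no key ≤ off: candidates empty on A's side, fallback on both
    have hempty : d.keys.filter (fun k => decide (k ≤ off)) = [] := by
      rw [List.filter_eq_nil_iff]
      intro k hk
      obtain ⟨i, hi, rfl⟩ := List.mem_iff_getElem.mp ((hmem k).mpr hk)
      simpa using hB i hi (by omega)
    rw [hempty, (PySem.List.max?_eq_none_iff ([] : List Int) (fun x => x)).mpr rfl,
      if_pos h0]
  · -- r > 0: A's max(candidates) is exactly ks[r-1]
    have hrlt : r - 1 < ks.length := by omega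
    have hkstar : ks[r-1] ≤ off := hA (r-1) hrlt (by omega)
    have hkc : ks[r-1] ∈ d.keys.filter (fun k => decide (k ≤ off)) := by
      rw [List.mem_filter]
      exact ⟨(hmem _).mp (List.getElem_mem hrlt), by simpa using hkstar⟩
    cases hm : PySem.List.max? (d.keys.filter (fun k => decide (k ≤ off))) (fun x => x) with
    | none =>
      rw [(PySem.List.max?_eq_none_iff _ _).mp hm] at hkc
      cases hkc
    | some m =>
      have hmmem := PySem.List.max?_mem hm
      rw [List.mem_filter] at hmmem
      obtain ⟨hmk, hmoff⟩ := hmmem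
      obtain ⟨i, hi, hiv⟩ := List.mem_iff_getElem.mp ((hmem m).mpr hmk)
      have hir : i < r := by
        by_contra hge
        exact hB i hi (by omega) (hiv ▸ by simpa using hmoff)
      have h1 : m ≤ ks[r-1] := hiv ▸ hmono i (r-1) (by omega) hrlt
      have h2 : ks[r-1] ≤ m := PySem.List.max?_isMax hm _ hkc
      have heq : ks[r-1] = m := le_antisymm h2 h1
      rw [if_neg h0, List.getD_eq_getElem ks 0 hrlt, heq]

-- ===== VERDICT (by name: the statement is the Claim_ definition above) =====
theorem resolve_page_py_spec : Claim_equal_resolve_page_py := by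
  intro full_text section_text page_map fallback _
  unfold Spec_resolve_page_py resolve_page_py resolve_page_py_alt
  by_cases h1 : (page_map.getD []).isEmpty
  · simp only [h1, if_true]
  · simp only [h1]
    by_cases h2 : PySem.Str.find full_text (PySem.Str.slice section_text none (some 80)) = -1
    · simp only [h2, if_true]
    · simp only [h2, if_false]
      exact pvCore fallback _ _
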